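-- pv_equiv track=rewrite | github.com/capbothers/Cass-Brothers_PIM | scripts/verify_billi_zip_capabilities.py | capabilities_from_tags
-- ===== SOURCE A (Python) =====
-- from typing import Dict, List, Optional, Tuple
--
-- FILTER_SYSTEM_MAPPINGS = {
--     # NEWZIPFilterSystem values
--     'All In One': {'is_boiling': 1, 'is_chilled': 1, 'is_sparkling': 1, 'is_filtered': 1, 'is_ambient': 1},
--     'Boiling & Chilled': {'is_boiling': 1, 'is_chilled': 1, 'is_sparkling': 0, 'is_filtered': 1, 'is_ambient': 0},
--     'Boiling / Chilled & Sparkling': {'is_boiling': 1, 'is_chilled': 1, 'is_sparkling': 1, 'is_filtered': 1, 'is_ambient': 0},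
--     'Boiling & Ambient': {'is_boiling': 1, 'is_chilled': 0, 'is_sparkling': 0, 'is_filtered': 1, 'is_ambient': 1},
--     'Boiling / Ambient': {'is_boiling': 1, 'is_chilled': 0, 'is_sparkling': 0, 'is_filtered': 1, 'is_ambient': 1},
--     'Chilled Only': {'is_boiling': 0, 'is_chilled': 1, 'is_sparkling': 0, 'is_filtered': 1, 'is_ambient': 0},
--     'Chilled & Sparkling': {'is_boiling': 0, 'is_chilled': 1, 'is_sparkling': 1, 'is_filtered': 1, 'is_ambient': 0},
--     'Chilled / Sparkling': {'is_boiling': 0, 'is_chilled': 1, 'is_sparkling': 1, 'is_filtered': 1, 'is_ambient': 0},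
--     'Ambient Only': {'is_boiling': 0, 'is_chilled': 0, 'is_sparkling': 0, 'is_filtered': 1, 'is_ambient': 1},
--     # Insinkerator / Blanco specific NEWZipFilterSystem tags
--     'Boiling Only': {'is_boiling': 1, 'is_chilled': 0, 'is_sparkling': 0, 'is_filtered': 1, 'is_ambient': 0},
--     'Boiling / Hot & Cold': {'is_boiling': 1, 'is_chilled': 0, 'is_sparkling': 0, 'is_filtered': 1, 'is_ambient': 0},
--     'Boiling / Chilled / Hot & Cold': {'is_boiling': 1, 'is_chilled': 1, 'is_sparkling': 0, 'is_filtered': 1, 'is_ambient': 0},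
--     'Boiling / Ambient / Hot & Cold': {'is_boiling': 1, 'is_chilled': 0, 'is_sparkling': 0, 'is_filtered': 1, 'is_ambient': 1},
--     'Hot / Cold & Ambient': {'is_boiling': 0, 'is_chilled': 0, 'is_sparkling': 0, 'is_filtered': 1, 'is_ambient': 1},
--     # Puretec specific
--     'Chilled / Sparkling & Ambient': {'is_boiling': 0, 'is_chilled': 1, 'is_sparkling': 1, 'is_filtered': 1, 'is_ambient': 1},
--     # ZIPFilterSystem values (older format)
--     'All-In-One': {'is_boiling': 1, 'is_chilled': 1, 'is_sparkling': 1, 'is_filtered': 1, 'is_ambient': 1},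
--     'Boiling / Chilled / Sparkling': {'is_boiling': 1, 'is_chilled': 1, 'is_sparkling': 1, 'is_filtered': 1, 'is_ambient': 0},
--     'Boiling / Chilled / Hot & Ambient': {'is_boiling': 1, 'is_chilled': 1, 'is_sparkling': 0, 'is_filtered': 1, 'is_ambient': 1},
--     'Boiling / Chilled / Sparkling / Hot & Ambient': {'is_boiling': 1, 'is_chilled': 1, 'is_sparkling': 1, 'is_filtered': 1, 'is_ambient': 1},
--     'Boiling / Ambient / Chilled': {'is_boiling': 1, 'is_chilled': 1, 'is_sparkling': 0, 'is_filtered': 1, 'is_ambient': 1},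
--     'Chilled / Sparkling / Ambient': {'is_boiling': 0, 'is_chilled': 1, 'is_sparkling': 1, 'is_filtered': 1, 'is_ambient': 1},
--     'Boiling / Chilled': {'is_boiling': 1, 'is_chilled': 1, 'is_sparkling': 0, 'is_filtered': 1, 'is_ambient': 0},
-- }
--
-- def extract_filter_system_tag(tags: List[str]) -> Optional[str]:
--     """Extract the NEWZIPFilterSystem or ZIPFilterSystem tag value."""
--     # Prefer NEWZIPFilterSystem (newer, more reliable)
--     for tag in tags:
--         for prefix in ['NEWZIPFilterSystem:', 'NEWZipFilterSystem:']:
--             if tag.startswith(prefix):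
--                 return tag[len(prefix):].strip()
--     # Fall back to ZIPFilterSystem
--     for tag in tags:
--         if tag.startswith('ZIPFilterSystem:'):
--             return tag[len('ZIPFilterSystem:'):].strip()
--     return None
--
-- def capabilities_from_tags(tags: List[str]) -> Dict[str, Optional[int]]:
--     """Extract capabilities from structured tags."""
--     system_value = extract_filter_system_tag(tags)
--     if system_value and system_value in FILTER_SYSTEM_MAPPINGS:
--         return dict(FILTER_SYSTEM_MAPPINGS[system_value])
--
--     # Fallback: check ZIPELEMENT tags
--     caps = {
--         'is_boiling': None,
--         'is_chilled': None,
--         'is_sparkling': None,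
--         'is_filtered': None,
--         'is_ambient': None,
--     }
--     for tag in tags:
--         if tag == 'ZIPELEMENT:Chilled':
--             caps['is_chilled'] = 1
--         elif tag == 'ZIPELEMENT:Sparkling':
--             caps['is_sparkling'] = 1
--         elif tag == 'ZIPELEMENT:Boiling':
--             caps['is_boiling'] = 1
--
--     # If any ZIPELEMENT found, assume filtered
--     if any(v == 1 for v in caps.values()):
--         caps['is_filtered'] = 1
--
--     return caps
-- ===== SOURCE B (Python) =====
-- from typing import Dict, List, Optional
--
-- FILTER_SYSTEM_MAPPINGS = {
--     'All In One': {'is_boiling': 1, 'is_chilled': 1, 'is_sparkling': 1, 'is_filtered': 1, 'is_ambient': 1},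
--     'Boiling & Chilled': {'is_boiling': 1, 'is_chilled': 1, 'is_sparkling': 0, 'is_filtered': 1, 'is_ambient': 0},
--     'Boiling / Chilled & Sparkling': {'is_boiling': 1, 'is_chilled': 1, 'is_sparkling': 1, 'is_filtered': 1, 'is_ambient': 0},
--     'Boiling & Ambient': {'is_boiling': 1, 'is_chilled': 0, 'is_sparkling': 0, 'is_filtered': 1, 'is_ambient': 1},
--     'Boiling / Ambient': {'is_boiling': 1, 'is_chilled': 0, 'is_sparkling': 0, 'is_filtered': 1, 'is_ambient': 1},
--     'Chilled Only': {'is_boiling': 0, 'is_chilled': 1, 'is_sparkling': 0, 'is_filtered': 1, 'is_ambient': 0},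
--     'Chilled & Sparkling': {'is_boiling': 0, 'is_chilled': 1, 'is_sparkling': 1, 'is_filtered': 1, 'is_ambient': 0},
--     'Chilled / Sparkling': {'is_boiling': 0, 'is_chilled': 1, 'is_sparkling': 1, 'is_filtered': 1, 'is_ambient': 0},
--     'Ambient Only': {'is_boiling': 0, 'is_chilled': 0, 'is_sparkling': 0, 'is_filtered': 1, 'is_ambient': 1},
--     'Boiling Only': {'is_boiling': 1, 'is_chilled': 0, 'is_sparkling': 0, 'is_filtered': 1, 'is_ambient': 0},
--     'Boiling / Hot & Cold': {'is_boiling': 1, 'is_chilled': 0, 'is_sparkling': 0, 'is_filtered': 1, 'is_ambient': 0},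
--     'Boiling / Chilled / Hot & Cold': {'is_boiling': 1, 'is_chilled': 1, 'is_sparkling': 0, 'is_filtered': 1, 'is_ambient': 0},
--     'Boiling / Ambient / Hot & Cold': {'is_boiling': 1, 'is_chilled': 0, 'is_sparkling': 0, 'is_filtered': 1, 'is_ambient': 1},
--     'Hot / Cold & Ambient': {'is_boiling': 0, 'is_chilled': 0, 'is_sparkling': 0, 'is_filtered': 1, 'is_ambient': 1},
--     'Chilled / Sparkling & Ambient': {'is_boiling': 0, 'is_chilled': 1, 'is_sparkling': 1, 'is_filtered': 1, 'is_ambient': 1},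
--     'All-In-One': {'is_boiling': 1, 'is_chilled': 1, 'is_sparkling': 1, 'is_filtered': 1, 'is_ambient': 1},
--     'Boiling / Chilled / Sparkling': {'is_boiling': 1, 'is_chilled': 1, 'is_sparkling': 1, 'is_filtered': 1, 'is_ambient': 0},
--     'Boiling / Chilled / Hot & Ambient': {'is_boiling': 1, 'is_chilled': 1, 'is_sparkling': 0, 'is_filtered': 1, 'is_ambient': 1},
--     'Boiling / Chilled / Sparkling / Hot & Ambient': {'is_boiling': 1, 'is_chilled': 1, 'is_sparkling': 1, 'is_filtered': 1, 'is_ambient': 1},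
--     'Boiling / Ambient / Chilled': {'is_boiling': 1, 'is_chilled': 1, 'is_sparkling': 0, 'is_filtered': 1, 'is_ambient': 1},
--     'Chilled / Sparkling / Ambient': {'is_boiling': 0, 'is_chilled': 1, 'is_sparkling': 1, 'is_filtered': 1, 'is_ambient': 1},
--     'Boiling / Chilled': {'is_boiling': 1, 'is_chilled': 1, 'is_sparkling': 0, 'is_filtered': 1, 'is_ambient': 0},
-- }
--
-- def capabilities_from_tags(tags: List[str]) -> Dict[str, Optional[int]]:
--     """Extract capabilities from structured tags (single pass over tags)."""
--     newzip = zipv = None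
--     chilled = sparkling = boiling = False
--     for tag in tags:
--         if newzip is None:
--             for prefix in ('NEWZIPFilterSystem:', 'NEWZipFilterSystem:'):
--                 if tag.startswith(prefix):
--                     newzip = tag[len(prefix):].strip()
--                     break
--         if zipv is None and tag.startswith('ZIPFilterSystem:'):
--             zipv = tag[len('ZIPFilterSystem:'):].strip()
--         if tag == 'ZIPELEMENT:Chilled':
--             chilled = True
--         elif tag == 'ZIPELEMENT:Sparkling':
--             sparkling = True
--         elif tag == 'ZIPELEMENT:Boiling':
--             boiling = True
--     system = newzip if newzip is not None else zipv
--     if system: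
--         mapping = FILTER_SYSTEM_MAPPINGS.get(system)
--         if mapping is not None:
--             return dict(mapping)
--     any_element = chilled or sparkling or boiling
--     return {
--         'is_boiling': 1 if boiling else None,
--         'is_chilled': 1 if chilled else None,
--         'is_sparkling': 1 if sparkling else None,
--         'is_filtered': 1 if any_element else None,
--         'is_ambient': None,
--     }
-- ===== Notes on version B (the rewrite author's own statement) =====
-- stated objective: alternative
-- what changed: B inlines extract_filter_system_tag and replaces A's three sequential scans of the tag list (NEWZIP prefix scan, ZIP prefix scan, ZIPELEMENT dict-mutation loop) by one single pass that records the first NEWZIP value, the first ZIP value and three boolean element flags, building the capabilities dict from those at the end.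
import Mathlib
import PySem

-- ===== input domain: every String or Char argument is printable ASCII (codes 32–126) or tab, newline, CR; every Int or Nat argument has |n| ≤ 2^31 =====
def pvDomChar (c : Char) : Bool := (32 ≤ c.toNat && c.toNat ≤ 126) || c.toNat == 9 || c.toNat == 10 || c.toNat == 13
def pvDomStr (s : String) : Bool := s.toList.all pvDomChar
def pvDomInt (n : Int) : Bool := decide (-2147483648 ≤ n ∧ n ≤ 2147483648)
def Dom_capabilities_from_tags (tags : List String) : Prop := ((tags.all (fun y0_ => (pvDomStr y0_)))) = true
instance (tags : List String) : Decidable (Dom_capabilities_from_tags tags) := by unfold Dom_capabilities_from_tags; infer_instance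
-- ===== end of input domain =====

-- B merges A's three sequential scans over the tags into a single pass that records the first
-- NEWZIP / ZIP filter-system value and the three ZIPELEMENT flags at once (alternative decomposition, same cost class).

-- shared module-level constant FILTER_SYSTEM_MAPPINGS (a dict literal with distinct keys)
def pvCapsVal (b c s f a : Int) : List (String × Option Int) :=
  [("is_boiling", some b), ("is_chilled", some c), ("is_sparkling", some s), ("is_filtered", some f), ("is_ambient", some a)]

def pvMAP : PySem.Dict String (List (String × Option Int)) :=
  ⟨[("All In One", pvCapsVal 1 1 1 1 1),
    ("Boiling & Chilled", pvCapsVal 1 1 0 1 0),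
    ("Boiling / Chilled & Sparkling", pvCapsVal 1 1 1 1 0),
    ("Boiling & Ambient", pvCapsVal 1 0 0 1 1),
    ("Boiling / Ambient", pvCapsVal 1 0 0 1 1),
    ("Chilled Only", pvCapsVal 0 1 0 1 0),
    ("Chilled & Sparkling", pvCapsVal 0 1 1 1 0),
    ("Chilled / Sparkling", pvCapsVal 0 1 1 1 0),
    ("Ambient Only", pvCapsVal 0 0 0 1 1),
    ("Boiling Only", pvCapsVal 1 0 0 1 0),
    ("Boiling / Hot & Cold", pvCapsVal 1 0 0 1 0),
    ("Boiling / Chilled / Hot & Cold", pvCapsVal 1 1 0 1 0),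
    ("Boiling / Ambient / Hot & Cold", pvCapsVal 1 0 0 1 1),
    ("Hot / Cold & Ambient", pvCapsVal 0 0 0 1 1),
    ("Chilled / Sparkling & Ambient", pvCapsVal 0 1 1 1 1),
    ("All-In-One", pvCapsVal 1 1 1 1 1),
    ("Boiling / Chilled / Sparkling", pvCapsVal 1 1 1 1 0),
    ("Boiling / Chilled / Hot & Ambient", pvCapsVal 1 1 0 1 1),
    ("Boiling / Chilled / Sparkling / Hot & Ambient", pvCapsVal 1 1 1 1 1),
    ("Boiling / Ambient / Chilled", pvCapsVal 1 1 0 1 1),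
    ("Chilled / Sparkling / Ambient", pvCapsVal 0 1 1 1 1),
    ("Boiling / Chilled", pvCapsVal 1 1 0 1 0)]⟩

-- ===== PORT A =====
-- first loop of extract_filter_system_tag: the two NEWZIP prefixes (both of length 19)
def pvExtractLoop1 : List String → Option String
  | [] => none
  | t :: ts =>
    if PySem.Str.startswith t "NEWZIPFilterSystem:" then
      some (PySem.Str.strip (PySem.Str.slice t (some 19) none))
    else if PySem.Str.startswith t "NEWZipFilterSystem:" then
      some (PySem.Str.strip (PySem.Str.slice t (some 19) none))
    else pvExtractLoop1 ts

-- second loop: 'ZIPFilterSystem:' (length 16)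
def pvExtractLoop2 : List String → Option String
  | [] => none
  | t :: ts =>
    if PySem.Str.startswith t "ZIPFilterSystem:" then
      some (PySem.Str.strip (PySem.Str.slice t (some 16) none))
    else pvExtractLoop2 ts

def extract_filter_system_tag (tags : List String) : Option String :=
  match pvExtractLoop1 tags with
  | some v => some v
  | none => pvExtractLoop2 tags

-- A's ZIPELEMENT loop mutating the caps dict
def pvCapsLoop : List String → PySem.Dict String (Option Int) → PySem.Dict String (Option Int)
  | [], caps => caps
  | t :: ts, caps =>
    if t == "ZIPELEMENT:Chilled" then pvCapsLoop ts (caps.insert "is_chilled" (some 1))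
    else if t == "ZIPELEMENT:Sparkling" then pvCapsLoop ts (caps.insert "is_sparkling" (some 1))
    else if t == "ZIPELEMENT:Boiling" then pvCapsLoop ts (caps.insert "is_boiling" (some 1))
    else pvCapsLoop ts caps

-- A's fallback block (caps dict literal, ZIPELEMENT loop, any(v == 1) check)
def pvFallbackA (tags : List String) : List (String × Option Int) :=
  let caps := pvCapsLoop tags
    ⟨[("is_boiling", none), ("is_chilled", none), ("is_sparkling", none), ("is_filtered", none), ("is_ambient", none)]⟩
  let caps := if caps.values.any (fun v => v == some (1 : Int)) then caps.insert "is_filtered" (some 1) else caps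
  caps.items

def capabilities_from_tags (tags : List String) : List (String × Option Int) :=
  match extract_filter_system_tag tags with
  | some v =>
    if v ≠ "" then
      match pvMAP.get? v with
      | some m => m
      | none => pvFallbackA tags
    else pvFallbackA tags
  | none => pvFallbackA tags

-- ===== PORT B =====
-- single pass: (first NEWZIP value, first ZIP value, chilled, sparkling, boiling)
def pvScan : List String → Option String → Option String → Bool → Bool → Bool →
    Option String × Option String × Bool × Bool × Bool
  | [], nz, zv, ch, sp, bo => (nz, zv, ch, sp, bo)
  | t :: ts, nz, zv, ch, sp, bo =>
    let nz' := match nz with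
      | some v => some v
      | none =>
        if PySem.Str.startswith t "NEWZIPFilterSystem:" then
          some (PySem.Str.strip (PySem.Str.slice t (some 19) none))
        else if PySem.Str.startswith t "NEWZipFilterSystem:" then
          some (PySem.Str.strip (PySem.Str.slice t (some 19) none))
        else none
    let zv' := match zv with
      | some v => some v
      | none =>
        if PySem.Str.startswith t "ZIPFilterSystem:" then
          some (PySem.Str.strip (PySem.Str.slice t (some 16) none))
        else none
    if t == "ZIPELEMENT:Chilled" then pvScan ts nz' zv' true sp bo
    else if t == "ZIPELEMENT:Sparkling" then pvScan ts nz' zv' ch true bo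
    else if t == "ZIPELEMENT:Boiling" then pvScan ts nz' zv' ch sp true
    else pvScan ts nz' zv' ch sp bo

def pvFallbackB (ch sp bo : Bool) : List (String × Option Int) :=
  [("is_boiling", if bo then some 1 else none),
   ("is_chilled", if ch then some 1 else none),
   ("is_sparkling", if sp then some 1 else none),
   ("is_filtered", if ch || sp || bo then some 1 else none),
   ("is_ambient", none)]

def capabilities_from_tags_alt (tags : List String) : List (String × Option Int) :=
  match pvScan tags none none false false false with
  | (nz, zv, ch, sp, bo) =>
    let system := match nz with | some v => some v | none => zv
    match system with
    | some v =>
      if v ≠ "" then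
        match pvMAP.get? v with
        | some m => m
        | none => pvFallbackB ch sp bo
      else pvFallbackB ch sp bo
    | none => pvFallbackB ch sp bo

-- ===== PRECONDITION & SPEC =====
def Spec_capabilities_from_tags (tags : List String) (out : List (String × Option Int)) : Prop := out = capabilities_from_tags_alt tags
instance (tags : List String) (out : List (String × Option Int)) : Decidable (Spec_capabilities_from_tags tags out) := by unfold Spec_capabilities_from_tags; infer_instance

-- ===== CLAIM (what is proved, stated in full; the proofs are below) =====
def Claim_equal_capabilities_from_tags : Prop := ∀ (tags : List String), Dom_capabilities_from_tags tags → Spec_capabilities_from_tags tags (capabilities_from_tags tags)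

-- ===== LEMMAS AND PROOFS =====
-- A's caps dict, with the three mutable slots abstracted
def pvD (b c s : Option Int) : PySem.Dict String (Option Int) :=
  ⟨[("is_boiling", b), ("is_chilled", c), ("is_sparkling", s), ("is_filtered", none), ("is_ambient", none)]⟩

theorem pvScan_spec (tags : List String) (nz zv : Option String) (ch sp bo : Bool) :
    pvScan tags nz zv ch sp bo =
      ((match nz with | some v => some v | none => pvExtractLoop1 tags),
       (match zv with | some v => some v | none => pvExtractLoop2 tags),
       ch || tags.any (· == "ZIPELEMENT:Chilled"),
       sp || tags.any (· == "ZIPELEMENT:Sparkling"),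
       bo || tags.any (· == "ZIPELEMENT:Boiling")) := by
  induction tags generalizing nz zv ch sp bo with
  | nil => cases nz <;> cases zv <;> simp [pvScan, pvExtractLoop1, pvExtractLoop2]
  | cons t ts ih =>
    by_cases hc : t = "ZIPELEMENT:Chilled" <;> by_cases hs : t = "ZIPELEMENT:Sparkling" <;>
      by_cases hb : t = "ZIPELEMENT:Boiling" <;>
      (try (exact absurd (hc.symm.trans hs) (by decide))) <;>
      (try (exact absurd (hc.symm.trans hb) (by decide))) <;>
      (try (exact absurd (hs.symm.trans hb) (by decide))) <;>
      cases nz <;> cases zv <;>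
      simp [pvScan, pvExtractLoop1, pvExtractLoop2, beq_eq_decide, hc, hs, hb] <;>
      (try split_ifs) <;> (try rw [ih]) <;> simp [beq_eq_decide]

theorem pvCapsLoop_spec (tags : List String) (b c s : Option Int) :
    pvCapsLoop tags (pvD b c s) =
      pvD (if tags.any (· == "ZIPELEMENT:Boiling") then some 1 else b)
          (if tags.any (· == "ZIPELEMENT:Chilled") then some 1 else c)
          (if tags.any (· == "ZIPELEMENT:Sparkling") then some 1 else s) := by
  induction tags generalizing b c s with
  | nil => simp [pvCapsLoop]
  | cons t ts ih =>
    have h1 : (pvD b c s).insert "is_chilled" (some 1) = pvD b (some 1) s := by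
      simp [pvD, PySem.Dict.insert, PySem.Dict.contains]
    have h2 : (pvD b c s).insert "is_sparkling" (some 1) = pvD b c (some 1) := by
      simp [pvD, PySem.Dict.insert, PySem.Dict.contains]
    have h3 : (pvD b c s).insert "is_boiling" (some 1) = pvD (some 1) c s := by
      simp [pvD, PySem.Dict.insert, PySem.Dict.contains]
    simp only [pvCapsLoop, List.any_cons]
    split_ifs <;> simp_all

theorem pvFallback_eq (tags : List String) :
    pvFallbackA tags =
      pvFallbackB (tags.any (· == "ZIPELEMENT:Chilled")) (tags.any (· == "ZIPELEMENT:Sparkling"))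
        (tags.any (· == "ZIPELEMENT:Boiling")) := by
  have h0 : (⟨[("is_boiling", none), ("is_chilled", none), ("is_sparkling", none),
      ("is_filtered", none), ("is_ambient", none)]⟩ : PySem.Dict String (Option Int)) =
      pvD none none none := rfl
  simp only [pvFallbackA, h0, pvCapsLoop_spec]
  cases tags.any (· == "ZIPELEMENT:Chilled") <;>
    cases tags.any (· == "ZIPELEMENT:Sparkling") <;>
    cases tags.any (· == "ZIPELEMENT:Boiling") <;> rfl

-- ===== VERDICT (by name: the statement is the Claim_ definition above) =====
theorem capabilities_from_tags_spec : Claim_equal_capabilities_from_tags := by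
  intro tags _
  unfold Spec_capabilities_from_tags capabilities_from_tags capabilities_from_tags_alt
    extract_filter_system_tag
  rw [pvScan_spec, pvFallback_eq]
  cases pvExtractLoop1 tags <;> cases pvExtractLoop2 tags <;> simp
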